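-- pv_equiv track=rewrite | github.com/quytttb/FomularLatex | 2026/25_02/radar_missile_3d_questions.py | simplify_sqrt
-- ===== SOURCE A (Python) =====
-- from typing import Any, Dict, List, Optional, Tuple
--
-- def simplify_sqrt(n: int) -> Tuple[int, int]:
--     """
--     Rút gọn căn bậc 2 của số nguyên n.
--     Trả về (ngoài_căn, trong_căn) sao cho ngoài_căn * sqrt(trong_căn) = sqrt(n).
--     """
--     if n == 0:
--         return 0, 0
--     if n < 0:
--         raise ValueError("Cannot square root negative number")
--
--     outside = 1
--     inside = n
--     d = 2
--     while d * d <= inside: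
--         if inside % (d * d) == 0:
--             outside *= d
--             inside //= (d * d)
--         else:
--             d += 1
--     return outside, inside
-- ===== SOURCE B (Python) =====
-- def simplify_sqrt(n):
--     """
--     Rút gọn căn bậc 2 của số nguyên n.
--     Trả về (ngoài_căn, trong_căn) sao cho ngoài_căn * sqrt(trong_căn) = sqrt(n).
--     """
--     if n == 0:
--         return 0, 0
--     if n < 0:
--         raise ValueError("Cannot square root negative number")
--     # Direct scan for the largest k with k*k dividing n; no repeated extraction.
--     best = 1
--     k = 2
--     while k * k <= n:
--         if n % (k * k) == 0:
--             best = k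
--         k += 1
--     return best, n // (best * best)
-- ===== Notes on version B (the rewrite author's own statement) =====
-- stated objective: alternative
-- what changed: B finds the largest k with k*k dividing n by a single bounded scan and returns (k, n // k**2), instead of A's repeated extraction of square factors with a shrinking 'inside'.
import Mathlib
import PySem

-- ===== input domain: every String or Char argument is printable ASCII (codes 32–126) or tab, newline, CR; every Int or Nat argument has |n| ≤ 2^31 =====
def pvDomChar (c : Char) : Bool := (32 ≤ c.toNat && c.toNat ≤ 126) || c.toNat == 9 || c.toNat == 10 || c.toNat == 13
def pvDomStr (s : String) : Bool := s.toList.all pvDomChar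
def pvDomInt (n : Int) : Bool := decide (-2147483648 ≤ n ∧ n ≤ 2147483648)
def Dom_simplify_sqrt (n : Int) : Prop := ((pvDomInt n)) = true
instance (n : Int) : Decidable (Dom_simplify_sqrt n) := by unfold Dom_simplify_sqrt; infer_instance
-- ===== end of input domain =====

-- B replaces A's repeated extraction of square factors by a single bounded scan for the
-- largest k with k*k ∣ n (objective: alternative; same asymptotic cost).

-- ===== PORT A =====
-- A's while loop; the outer 'if 2 ≤ d ∧ 0 < inside' is only a totality guard (always true
-- on the real execution, where d starts at 2 and inside starts at n > 0).
def pyALoop (outside inside d : Int) : Int × Int :=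
  if h : 2 ≤ d ∧ 0 < inside then
    if hdd : d * d ≤ inside then
      if PySem.Int.mod inside (d * d) = 0 then
        pyALoop (outside * d) (PySem.Int.floordiv inside (d * d)) d
      else
        pyALoop outside inside (d + 1)
    else (outside, inside)
  else (outside, inside)
termination_by (inside.toNat, (inside - d).toNat)
decreasing_by
  · apply Prod.Lex.left
    have h4 : (4:Int) ≤ d * d := by nlinarith [h.1]
    have := PySem.Int.floordiv_lt_iff_lt_mul (a := inside) (b := d * d) (q := inside) (by omega)
    have hlt : PySem.Int.floordiv inside (d * d) < inside := this.mpr (by nlinarith [h.2])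
    omega
  · apply Prod.Lex.right
    have : d < d * d := by nlinarith [h.1]
    omega

-- On n < 0 the Python raises ValueError; that input is outside Pre_ and the port returns (0, 0).
def simplify_sqrt (n : Int) : Int × Int :=
  if n = 0 then (0, 0)
  else if n < 0 then (0, 0)
  else pyALoop 1 n 2

-- ===== PORT B =====
-- B's while loop; the 'if 2 ≤ k' wrapper is only a totality guard (k starts at 2).
def pyBLoop (n best k : Int) : Int :=
  if h2 : 2 ≤ k then
    if hk : k * k ≤ n then
      pyBLoop n (if PySem.Int.mod n (k * k) = 0 then k else best) (k + 1)
    else best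
  else best
termination_by (n - k).toNat
decreasing_by
  have : k < k * k := by nlinarith
  omega

def simplify_sqrt_alt (n : Int) : Int × Int :=
  if n = 0 then (0, 0)
  else if n < 0 then (0, 0)
  else
    let best := pyBLoop n 1 2
    (best, PySem.Int.floordiv n (best * best))

-- ===== PRECONDITION & SPEC =====
-- Pre_ excludes exactly n < 0, where the Python A raises ValueError (and B raises too).
def Pre_simplify_sqrt (n : Int) : Prop := 0 ≤ n
instance (n : Int) : Decidable (Pre_simplify_sqrt n) := by unfold Pre_simplify_sqrt; infer_instance
def pvWitness_simplify_sqrt : Int := 12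

def Spec_simplify_sqrt (n : Int) (out : Int × Int) : Prop := out = simplify_sqrt_alt n
instance (n : Int) (out : Int × Int) : Decidable (Spec_simplify_sqrt n out) := by unfold Spec_simplify_sqrt; infer_instance

-- ===== CLAIM (what is proved, stated in full; the proofs are below) =====
def Claim_equal_simplify_sqrt : Prop := ∀ (n : Int), Dom_simplify_sqrt n → Pre_simplify_sqrt n → Spec_simplify_sqrt n (simplify_sqrt n)

-- ===== LEMMAS AND PROOFS =====

-- A's loop keeps outside²·inside invariant, keeps both positive, and ends with an
-- 'inside' that has no square divisor k² (k ≥ 2).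
theorem pyALoop_spec (outside inside d : Int)
    (hd : 2 ≤ d) (hi : 0 < inside) (ho : 0 < outside)
    (hinv : ∀ k : Int, 2 ≤ k → k < d → ¬ (k * k ∣ inside)) :
    0 < (pyALoop outside inside d).1 ∧ 0 < (pyALoop outside inside d).2 ∧
    (pyALoop outside inside d).1 * (pyALoop outside inside d).1 * (pyALoop outside inside d).2
      = outside * outside * inside ∧
    (∀ k : Int, 2 ≤ k → ¬ (k * k ∣ (pyALoop outside inside d).2)) := by
  induction outside, inside, d using pyALoop.induct with
  | case1 outside inside d h hdd hm ih =>
    rw [pyALoop, dif_pos h, dif_pos hdd, if_pos hm]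
    have hdvd : d * d ∣ inside := (PySem.Int.mod_eq_zero_iff_dvd _ _).mp hm
    have hq : PySem.Int.floordiv inside (d * d) = inside / (d * d) :=
      PySem.Int.floordiv_eq_ediv_of_pos (by nlinarith [h.1])
    have hmul : d * d * (inside / (d * d)) = inside := Int.mul_ediv_cancel' hdvd
    have hqpos : 0 < inside / (d * d) := by
      rcases hdvd with ⟨c, hc⟩
      have : inside / (d * d) = c := by rw [hc]; exact Int.mul_ediv_cancel_left c (by nlinarith [h.1])
      nlinarith [h.2, h.1, this, hc]
    have hdvd2 : inside / (d * d) ∣ inside := ⟨d * d, by linear_combination (-1 : Int) * hmul⟩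
    have hinv' : ∀ k : Int, 2 ≤ k → k < d → ¬ (k * k ∣ inside / (d * d)) := by
      intro k hk2 hkd hkdvd
      exact hinv k hk2 hkd (hkdvd.trans hdvd2)
    have := ih h.1 (by rw [hq]; exact hqpos) (by nlinarith [h.1]) (by rw [hq]; exact hinv')
    refine ⟨this.1, this.2.1, ?_, this.2.2.2⟩
    rw [this.2.2.1, hq]
    linear_combination outside * outside * hmul
  | case2 outside inside d h hdd hm ih =>
    rw [pyALoop, dif_pos h, dif_pos hdd, if_neg hm]
    refine ih (by omega) h.2 ho ?_
    intro k hk2 hkd hkdvd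
    rcases lt_or_eq_of_le (by omega : k ≤ d) with hlt | heq
    · exact hinv k hk2 hlt hkdvd
    · exact hm ((PySem.Int.mod_eq_zero_iff_dvd _ _).mpr (heq ▸ hkdvd))
  | case3 outside inside d h hdd =>
    rw [pyALoop, dif_pos h, dif_neg hdd]
    refine ⟨ho, h.2, rfl, ?_⟩
    intro k hk2 hkdvd
    have hkk : k * k ≤ inside := Int.le_of_dvd h.2 hkdvd
    have hkd : k < d := by nlinarith [h.1]
    exact hinv k hk2 hkd hkdvd
  | case4 outside inside d h =>
    exact absurd ⟨hd, hi⟩ h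


-- B's loop computes the maximum k with k*k ∣ n among the scanned range.
theorem pyBLoop_spec (n best k : Int)
    (hn : 0 < n) (hk : 2 ≤ k) (hb : 0 < best) (hbd : best * best ∣ n)
    (hmax : ∀ j : Int, 2 ≤ j → j < k → j * j ∣ n → j ≤ best) :
    0 < pyBLoop n best k ∧ (pyBLoop n best k) * (pyBLoop n best k) ∣ n ∧
    (∀ j : Int, 2 ≤ j → j * j ∣ n → j ≤ pyBLoop n best k) := by
  induction best, k using pyBLoop.induct n with
  | case1 best k h2 hkk ih =>
    rw [pyBLoop, dif_pos h2, dif_pos hkk]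
    by_cases hm : PySem.Int.mod n (k * k) = 0
    · have hkd : k * k ∣ n := (PySem.Int.mod_eq_zero_iff_dvd _ _).mp hm
      simp only [hm, dite_true] at ih ⊢
      exact ih (by omega) (by omega) hkd (fun j hj2 hjk hjd => by omega)
    · simp only [hm, dite_false] at ih ⊢
      refine ih (by omega) hb hbd ?_
      intro j hj2 hjk hjd
      rcases lt_or_eq_of_le (by omega : j ≤ k) with h | h
      · exact hmax j hj2 h hjd
      · exact absurd ((PySem.Int.mod_eq_zero_iff_dvd _ _).mpr (h ▸ hjd)) hm
  | case2 best k h2 hkk =>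
    rw [pyBLoop, dif_pos h2, dif_neg hkk]
    refine ⟨hb, hbd, ?_⟩
    intro j hj2 hjd
    have hle : j * j ≤ n := Int.le_of_dvd hn hjd
    have : j < k := by nlinarith
    exact hmax j hj2 this hjd
  | case3 best k h2 =>
    omega


-- Bridge: if i has no square divisors then any k with k² ∣ o²·i satisfies k ≤ o.
theorem le_of_sq_dvd_sq_mul_squarefree (o i k : Int)
    (ho : 0 < o) (hi : 0 < i) (hsf : ∀ m : Int, 2 ≤ m → ¬ (m * m ∣ i))
    (hk : 2 ≤ k) (hdvd : k * k ∣ o * o * i) : k ≤ o := by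
  set O := o.toNat with hOdef
  set I := i.toNat with hIdef
  set K := k.toNat with hKdef
  have hoc : o = (O : Int) := by omega
  have hic : i = (I : Int) := by omega
  have hkc : k = (K : Int) := by omega
  have hO0 : O ≠ 0 := by omega
  have hI0 : I ≠ 0 := by omega
  have hK0 : K ≠ 0 := by omega
  -- transfer divisibility to ℕ
  have hKdvd : K * K ∣ O * O * I := by
    have : ((K * K : Nat) : Int) ∣ ((O * O * I : Nat) : Int) := by
      push_cast
      rw [← hoc, ← hic, ← hkc]
      exact hdvd
    exact_mod_cast this
  -- I is squarefree
  have hsq : Squarefree I := by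
    rw [Nat.squarefree_iff_prime_squarefree]
    intro p pp hpp
    apply hsf (p : Int) (by exact_mod_cast pp.two_le)
    have : ((p * p : Nat) : Int) ∣ ((I : Nat) : Int) := by exact_mod_cast hpp
    rw [← hic] at this
    push_cast at this
    exact this
  have hfle : (K * K).factorization ≤ (O * O * I).factorization :=
    (Nat.factorization_le_iff_dvd (by positivity) (by positivity)).mpr hKdvd
  have hKO : K ∣ O := by
    rw [← Nat.factorization_le_iff_dvd hK0 hO0]
    intro p
    have h1 := hfle p
    rw [Nat.factorization_mul hK0 hK0] at h1
    rw [Nat.factorization_mul (mul_ne_zero hO0 hO0) hI0, Nat.factorization_mul hO0 hO0] at h1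
    have h2 : I.factorization p ≤ 1 := (Nat.squarefree_iff_factorization_le_one hI0).mp hsq p
    simp only [Finsupp.add_apply] at h1
    omega
  have : K ≤ O := Nat.le_of_dvd (by omega) hKO
  omega


-- ===== VERDICT (by name: the statement is the Claim_ definition above) =====
theorem simplify_sqrt_spec : Claim_equal_simplify_sqrt := by
  intro n _ hpre
  unfold Spec_simplify_sqrt simplify_sqrt simplify_sqrt_alt
  by_cases h0 : n = 0
  · simp [h0]
  · have hn : 0 < n := by
      unfold Pre_simplify_sqrt at hpre; omega
    rw [if_neg h0, if_neg (by omega), if_neg h0, if_neg (by omega)]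
    have hA := pyALoop_spec 1 n 2 (le_refl 2) hn one_pos (by intro k hk2 hkd; omega)
    obtain ⟨hA1, hA2, hA3, hA4⟩ := hA
    set o := (pyALoop 1 n 2).1 with hodef
    set i := (pyALoop 1 n 2).2 with hidef
    have hoin : o * o * i = n := by rw [hA3]; ring
    have hoon : o * o ∣ n := ⟨i, hoin.symm⟩
    have hB := pyBLoop_spec n 1 2 hn (le_refl 2) one_pos (by simp)
      (by intro j h2 hj hjd; omega)
    obtain ⟨hB1, hB2, hB3⟩ := hB
    set b := pyBLoop n 1 2 with hbdef
    have hob : o ≤ b := by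
      rcases lt_or_ge o 2 with h | h
      · omega
      · exact hB3 o h hoon
    have hbo : b ≤ o := by
      rcases lt_or_ge b 2 with h | h
      · omega
      · exact le_of_sq_dvd_sq_mul_squarefree o i b hA1 hA2 hA4 h (by rw [hoin]; exact hB2)
    have hbeq : b = o := le_antisymm hbo hob
    have hsnd : PySem.Int.floordiv n (b * b) = i := by
      rw [hbeq, PySem.Int.floordiv_eq_ediv_of_pos (mul_pos hA1 hA1), ← hoin]
      exact Int.mul_ediv_cancel_left i (ne_of_gt (mul_pos hA1 hA1))
    calc pyALoop 1 n 2 = (o, i) := (Prod.mk.eta).symm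
      _ = (b, PySem.Int.floordiv n (b * b)) := by rw [hbeq] at hsnd ⊢; rw [hsnd]
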